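-- pv_equiv track=rewrite | github.com/Glassar/dd2394-Security-Project | e91/key_reconciliation.py | cascade_error_correction
-- ===== SOURCE A (Python) =====
-- def cascade_error_correction(alice_key, bob_key, initial_block_size=1, rounds=4):
--     key_length = len(alice_key)
--     bob_key = bob_key.copy()  # Create a copy to avoid modifying the original
--
--     for round in range(rounds):
--         block_size = initial_block_size * (2 ** round)
--
--         for i in range(0, key_length, block_size):
--             alice_block = alice_key[i:i+block_size]
--             bob_block = bob_key[i:i+block_size]
--
--             if parity(alice_block) != parity(bob_block):
--                 error_index = binary_search_error(alice_block, bob_block)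
--                 bob_key[i + error_index] = alice_key[i + error_index]
--
--                 # Cascade effect
--                 if round > 0:
--                     cascade_to_previous_blocks(alice_key, bob_key, i + error_index, initial_block_size)
--     return bob_key
--
-- def parity(block):
--     return sum(block) % 2
--
-- def binary_search_error(alice_block, bob_block):
--     start, end = 0, len(alice_block) - 1
--     while start < end:
--         mid = (start + end) // 2
--         if parity(alice_block[:mid+1]) != parity(bob_block[:mid+1]):
--             end = mid
--         else:
--             start = mid + 1
--     return start
--
-- def cascade_to_previous_blocks(alice_key, bob_key, error_index, min_block_size):
--     block_size = len(alice_key) // 2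
--     while block_size >= min_block_size:
--         block_start = (error_index // block_size) * block_size
--         alice_block = alice_key[block_start:block_start+block_size]
--         bob_block = bob_key[block_start:block_start+block_size]
--         if parity(alice_block) != parity(bob_block):
--             new_error_index = binary_search_error(alice_block, bob_block)
--             bob_key[block_start + new_error_index] = alice_key[block_start + new_error_index]
--         block_size //= 2
-- ===== SOURCE B (Python) =====
-- def cascade_error_correction(alice_key, bob_key, initial_block_size=1, rounds=4):
--     n = len(alice_key)
--     m = len(bob_key)
--     bob_key = bob_key.copy()
--     # Prefix-parity arrays: PA[k] = parity of alice_key[:k], PB[k] = parity of bob_key[:k].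
--     # Every block-parity test and every binary-search probe is then O(1).
--     PA = [0]
--     for v in alice_key:
--         PA.append((PA[-1] + v) % 2)
--     PB = [0]
--     for v in bob_key:
--         PB.append((PB[-1] + v) % 2)
--
--     def mismatch(l, r):
--         # parity(alice_key[l:r]) != parity(bob_key[l:r]); min clamps the ragged last block
--         return (PA[min(r, n)] + PA[l] + PB[min(r, m)] + PB[l]) % 2 == 1
--
--     def search(l, r):
--         # binary search for the error position inside the block [l, r)
--         start, end = 0, min(r, n) - l - 1
--         while start < end:
--             mid = (start + end) // 2
--             if (PA[l + mid + 1] + PA[l] + PB[l + mid + 1] + PB[l]) % 2 == 1: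
--                 end = mid
--             else:
--                 start = mid + 1
--         return start
--
--     def fix(j):
--         if (alice_key[j] - bob_key[j]) % 2 != 0:
--             for k in range(j + 1, m + 1):
--                 PB[k] = (PB[k] + 1) % 2
--         bob_key[j] = alice_key[j]
--
--     for r in range(rounds):
--         bs = initial_block_size * (2 ** r)
--         for i in range(0, n, bs):
--             if mismatch(i, i + bs):
--                 j = i + search(i, i + bs)
--                 fix(j)
--                 if r > 0:
--                     b2 = n // 2
--                     while b2 >= initial_block_size:
--                         l = (j // b2) * b2
--                         if mismatch(l, l + b2):
--                             fix(l + search(l, l + b2))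
--                         b2 //= 2
--     return bob_key
-- ===== Notes on version B (the rewrite author's own statement) =====
-- stated objective: faster
-- what changed: B precomputes one prefix-parity array per key, so every block-parity test and every binary-search probe is O(1) prefix arithmetic instead of summing fresh slices of both keys, and a correction updates bob's prefix array by one suffix flip; Pre_ excludes initial_block_size=0 with rounds>=1 (A raises ValueError) and bob_key shorter than alice_key with the loops active, where A often raises IndexError writing past bob's end and otherwise returns an accidental truncation-dependent value that B's prefix lookups turn into an IndexError.
-- outside the precondition, e.g. on cascade_error_correction([0, 0], [], 1, 1): A returns [], B raises IndexError
import Mathlib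
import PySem

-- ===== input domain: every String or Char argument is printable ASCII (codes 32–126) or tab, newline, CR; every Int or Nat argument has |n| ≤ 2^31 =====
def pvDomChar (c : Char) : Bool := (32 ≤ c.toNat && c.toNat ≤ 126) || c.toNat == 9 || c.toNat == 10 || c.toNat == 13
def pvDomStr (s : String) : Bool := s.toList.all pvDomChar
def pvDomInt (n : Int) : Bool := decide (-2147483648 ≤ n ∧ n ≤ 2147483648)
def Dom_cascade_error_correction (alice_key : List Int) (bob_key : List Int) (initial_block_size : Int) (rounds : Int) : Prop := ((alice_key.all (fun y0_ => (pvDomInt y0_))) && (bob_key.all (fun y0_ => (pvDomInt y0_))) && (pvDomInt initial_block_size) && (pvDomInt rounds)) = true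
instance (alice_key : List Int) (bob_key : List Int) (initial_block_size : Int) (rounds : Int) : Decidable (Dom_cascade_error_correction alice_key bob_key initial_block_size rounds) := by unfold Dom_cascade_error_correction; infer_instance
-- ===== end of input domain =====

-- B replaces A's repeated slice-summing parity probes by one prefix-parity array per key (O(1) per probe); equivalence is about the return value only (A copies bob_key before mutating).


-- ===== PORT A =====

-- parity(block) = sum(block) % 2
def pyParity (block : List Int) : Int := PySem.Int.mod block.sum 2

-- midpoint bounds, used by the ports' binary-search loops for termination
theorem pv_mid_bounds (s e : Int) (h : s < e) :
    s ≤ PySem.Int.floordiv (s + e) 2 ∧ PySem.Int.floordiv (s + e) 2 < e := by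
  have h1 := PySem.Int.floordiv_mul_add_mod (s + e) 2
  have h2 := PySem.Int.mod_nonneg (s + e) (b := 2) (by norm_num)
  have h3 := PySem.Int.mod_lt (s + e) (b := 2) (by norm_num)
  omega

-- the while-loop of binary_search_error
def bsLoop (ab bb : List Int) (s e : Int) : Int :=
  if h : s < e then
    let mid := PySem.Int.floordiv (s + e) 2
    if pyParity (PySem.List.slice ab none (some (mid + 1))) ≠
       pyParity (PySem.List.slice bb none (some (mid + 1))) then
      bsLoop ab bb s mid
    else
      bsLoop ab bb (mid + 1) e
  else s
termination_by (e - s).toNat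
decreasing_by
  · have := pv_mid_bounds s e h; omega
  · have := pv_mid_bounds s e h; omega

def binary_search_error (ab bb : List Int) : Int :=
  bsLoop ab bb 0 (PySem.List.len ab - 1)

-- floordiv by 2 shrinks positive ints (termination of the cascade while-loops)
theorem pv_half_lt (bs : Int) (h : 1 ≤ bs) :
    (PySem.Int.floordiv bs 2).toNat < bs.toNat := by
  have h1 := PySem.Int.floordiv_mul_add_mod bs 2
  have h2 := PySem.Int.mod_nonneg bs (b := 2) (by norm_num)
  have h3 := PySem.Int.mod_lt bs (b := 2) (by norm_num)
  omega

-- the while-loop of cascade_to_previous_blocks; the '1 ≤ bs' conjunct only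
-- totalizes the loop (for min_bs ≥ 1 it is implied; Python diverges for min_bs ≤ 0)
def cascLoop (alice_key bob_key : List Int) (error_index min_bs bs : Int) : List Int :=
  if h : min_bs ≤ bs ∧ 1 ≤ bs then
    let bstart := PySem.Int.floordiv error_index bs * bs
    let ab := PySem.List.slice alice_key (some bstart) (some (bstart + bs))
    let bb := PySem.List.slice bob_key (some bstart) (some (bstart + bs))
    let bob' :=
      if pyParity ab ≠ pyParity bb then
        let ne := binary_search_error ab bb
        PySem.List.pySetD bob_key (bstart + ne) (PySem.List.pyGetD alice_key (bstart + ne) 0)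
      else bob_key
    cascLoop alice_key bob' error_index min_bs (PySem.Int.floordiv bs 2)
  else bob_key
termination_by bs.toNat
decreasing_by exact pv_half_lt bs h.2

def cascade_to_previous_blocks (alice_key bob_key : List Int) (error_index min_block_size : Int) : List Int :=
  cascLoop alice_key bob_key error_index min_block_size
    (PySem.Int.floordiv (PySem.List.len alice_key) 2)

def cascade_error_correction (alice_key : List Int) (bob_key : List Int) (initial_block_size : Int) (rounds : Int) : List Int :=
  let key_length := PySem.List.len alice_key
  (PySem.List.pyRange 0 rounds 1).foldl (fun bob r =>
    let block_size := initial_block_size * 2 ^ r.toNat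
    (PySem.List.pyRange 0 key_length block_size).foldl (fun bob i =>
      let alice_block := PySem.List.slice alice_key (some i) (some (i + block_size))
      let bob_block := PySem.List.slice bob (some i) (some (i + block_size))
      if pyParity alice_block ≠ pyParity bob_block then
        let ei := binary_search_error alice_block bob_block
        let bob' := PySem.List.pySetD bob (i + ei) (PySem.List.pyGetD alice_key (i + ei) 0)
        if r > 0 then cascade_to_previous_blocks alice_key bob' (i + ei) initial_block_size
        else bob'
      else bob) bob) bob_key

-- ===== PORT B =====

-- (PA[min(r,n)] + PA[l] + PB[min(r,m)] + PB[l]) % 2 == 1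
def altMismatch (PA PB : List Int) (n m l r : Int) : Bool :=
  PySem.Int.mod (PySem.List.pyGetD PA (min r n) 0 + PySem.List.pyGetD PA l 0 +
    PySem.List.pyGetD PB (min r m) 0 + PySem.List.pyGetD PB l 0) 2 == 1

-- the while-loop of B's search: same bisection, O(1) probes on the prefix arrays
def altSearchLoop (PA PB : List Int) (l s e : Int) : Int :=
  if h : s < e then
    let mid := PySem.Int.floordiv (s + e) 2
    if PySem.Int.mod (PySem.List.pyGetD PA (l + mid + 1) 0 + PySem.List.pyGetD PA l 0 +
        PySem.List.pyGetD PB (l + mid + 1) 0 + PySem.List.pyGetD PB l 0) 2 = 1 then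
      altSearchLoop PA PB l s mid
    else
      altSearchLoop PA PB l (mid + 1) e
  else s
termination_by (e - s).toNat
decreasing_by
  · have := pv_mid_bounds s e h; omega
  · have := pv_mid_bounds s e h; omega

def altSearch (PA PB : List Int) (n l r : Int) : Int :=
  altSearchLoop PA PB l 0 (min r n - l - 1)

-- fix(j): state is (bob, PB)
def altFix (alice_key : List Int) (m : Int) (st : List Int × List Int) (j : Int) :
    List Int × List Int :=
  let PB' :=
    if PySem.Int.mod (PySem.List.pyGetD alice_key j 0 - PySem.List.pyGetD st.1 j 0) 2 ≠ 0 then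
      (PySem.List.pyRange (j + 1) (m + 1) 1).foldl
        (fun P k => PySem.List.pySetD P k (PySem.Int.mod (PySem.List.pyGetD P k 0 + 1) 2)) st.2
    else st.2
  (PySem.List.pySetD st.1 j (PySem.List.pyGetD alice_key j 0), PB')

-- B's cascade while-loop; same totalizing '1 ≤ b2' guard as in port A
def altCascLoop (alice_key PA : List Int) (n m : Int)
    (st : List Int × List Int) (j min_bs b2 : Int) : List Int × List Int :=
  if h : min_bs ≤ b2 ∧ 1 ≤ b2 then
    let l := PySem.Int.floordiv j b2 * b2
    let st' :=
      if altMismatch PA st.2 n m l (l + b2) then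
        altFix alice_key m st (l + altSearch PA st.2 n l (l + b2))
      else st
    altCascLoop alice_key PA n m st' j min_bs (PySem.Int.floordiv b2 2)
  else st
termination_by b2.toNat
decreasing_by exact pv_half_lt b2 h.2

def cascade_error_correction_alt (alice_key : List Int) (bob_key : List Int) (initial_block_size : Int) (rounds : Int) : List Int :=
  let n := PySem.List.len alice_key
  let m := PySem.List.len bob_key
  let PA := (alice_key.foldl (fun Pp v =>
      (Pp.1 ++ [PySem.Int.mod (Pp.2 + v) 2], PySem.Int.mod (Pp.2 + v) 2)) ([(0 : Int)], (0 : Int))).1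
  let PB := (bob_key.foldl (fun Pp v =>
      (Pp.1 ++ [PySem.Int.mod (Pp.2 + v) 2], PySem.Int.mod (Pp.2 + v) 2)) ([(0 : Int)], (0 : Int))).1
  ((PySem.List.pyRange 0 rounds 1).foldl (fun st r =>
    let bs := initial_block_size * 2 ^ r.toNat
    (PySem.List.pyRange 0 n bs).foldl (fun st i =>
      if altMismatch PA st.2 n m i (i + bs) then
        let j := i + altSearch PA st.2 n i (i + bs)
        let st' := altFix alice_key m st j
        if r > 0 then altCascLoop alice_key PA n m st' j initial_block_size (PySem.Int.floordiv n 2)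
        else st'
      else st) st) (bob_key, PB)).1

-- ===== PRECONDITION & SPEC =====
-- Pre_ excludes (a) initial_block_size = 0 with rounds ≥ 1, where A raises ValueError
-- (range step 0), and (b) bob_key shorter than alice_key when the correction loops actually
-- run (rounds ≥ 1 and a positive block size), where A often raises IndexError writing past
-- bob's end and otherwise returns an accidental truncation-dependent value while B's
-- prefix-parity lookups past bob's end raise IndexError.
def Pre_cascade_error_correction (alice_key : List Int) (bob_key : List Int) (initial_block_size : Int) (rounds : Int) : Prop :=
  (rounds ≤ 0 ∨ initial_block_size ≠ 0) ∧
  (rounds ≤ 0 ∨ initial_block_size < 0 ∨ alice_key.length ≤ bob_key.length)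
instance (alice_key : List Int) (bob_key : List Int) (initial_block_size : Int) (rounds : Int) : Decidable (Pre_cascade_error_correction alice_key bob_key initial_block_size rounds) := by unfold Pre_cascade_error_correction; infer_instance

def pvWitness_cascade_error_correction : List Int × List Int × Int × Int := ([1, 0, 1, 1], [1, 1, 1, 0], 1, 2)

def Spec_cascade_error_correction (alice_key : List Int) (bob_key : List Int) (initial_block_size : Int) (rounds : Int) (out : List Int) : Prop := out = cascade_error_correction_alt alice_key bob_key initial_block_size rounds
instance (alice_key : List Int) (bob_key : List Int) (initial_block_size : Int) (rounds : Int) (out : List Int) : Decidable (Spec_cascade_error_correction alice_key bob_key initial_block_size rounds out) := by unfold Spec_cascade_error_correction; infer_instance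

-- ===== CLAIM (what is proved, stated in full; the proofs are below) =====
def Claim_equal_cascade_error_correction : Prop := ∀ (alice_key : List Int) (bob_key : List Int) (initial_block_size : Int) (rounds : Int), Dom_cascade_error_correction alice_key bob_key initial_block_size rounds → Pre_cascade_error_correction alice_key bob_key initial_block_size rounds → Spec_cascade_error_correction alice_key bob_key initial_block_size rounds (cascade_error_correction alice_key bob_key initial_block_size rounds)

-- ===== LEMMAS AND PROOFS =====

-- PySem.Int.mod _ 2 is emod
theorem pv_mod2 (x : Int) : PySem.Int.mod x 2 = x % 2 :=
  PySem.Int.mod_eq_emod_of_pos (by norm_num)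

-- prefix-parity array of xs: mkPS xs [k] = (sum of xs[0:k]) % 2
def mkPS (xs : List Int) : List Int :=
  (List.range (xs.length + 1)).map (fun k => (xs.take k).sum % 2)

theorem length_mkPS (xs : List Int) : (mkPS xs).length = xs.length + 1 := by
  simp [mkPS]

theorem getPS (xs : List Int) (i : Int) (h0 : 0 ≤ i) (h1 : i ≤ xs.length) :
    PySem.List.pyGetD (mkPS xs) i 0 = (xs.take i.toNat).sum % 2 := by
  rw [PySem.List.pyGetD_eq_getElem _ 0 h0 (by rw [length_mkPS]; push_cast; omega)]
  simp [mkPS]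

theorem getD_mkPS (xs : List Int) (k : Nat) (hk : k ≤ xs.length) :
    (mkPS xs).getD k 0 = (xs.take k).sum % 2 := by
  rw [mkPS, List.getD_eq_getElem _ _ (by simp; omega)]
  simp

-- prefix sum split: sum xs[0:a] + sum xs[a:a+b] = sum xs[0:min(a+b,len)]
theorem seg_sum (xs : List Int) (a b : Nat) (ha : a ≤ xs.length) :
    (xs.take a).sum + ((xs.drop a).take b).sum = (xs.take (min (a + b) xs.length)).sum := by
  have h1 := List.take_add (l := xs) (i := a) (j := b)
  have h2 : xs.take (a + b) = xs.take (min (a + b) xs.length) :=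
    List.take_eq_take_iff.mpr (by omega)
  rw [← h2, h1, List.sum_append]

theorem mismatch_iff (alice bob : List Int) (hnm : alice.length ≤ bob.length)
    (l r : Int) (h0 : 0 ≤ l) (hln : l < alice.length) (hlr : l < r) :
    ((pyParity (PySem.List.slice alice (some l) (some r)) ≠
      pyParity (PySem.List.slice bob (some l) (some r))) ↔
     altMismatch (mkPS alice) (mkPS bob) (alice.length) (bob.length) l r = true) := by
  have hr0 : 0 ≤ r := by omega
  rw [PySem.List.slice_toNat alice h0 hr0, PySem.List.slice_toNat bob h0 hr0]
  have hsA := seg_sum alice l.toNat (r.toNat - l.toNat) (by omega)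
  have hsB := seg_sum bob l.toNat (r.toNat - l.toNat) (by omega)
  simp only [altMismatch, pyParity, pv_mod2, beq_iff_eq, ne_eq]
  rw [getPS alice (min r (alice.length : Int)) (by omega) (by omega),
      getPS alice l h0 (by omega),
      getPS bob (min r (bob.length : Int)) (by omega) (by omega),
      getPS bob l h0 (by omega)]
  have e1 : (min r ((alice.length : Int))).toNat = min (l.toNat + (r.toNat - l.toNat)) alice.length := by omega
  have e2 : (min r ((bob.length : Int))).toNat = min (l.toNat + (r.toNat - l.toNat)) bob.length := by omega
  rw [e1, e2]
  omega

theorem prefix_probe (alice bob : List Int) (hnm : alice.length ≤ bob.length)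
    (l r mid : Int) (h0 : 0 ≤ l) (hlr : l < r) (hm0 : 0 ≤ mid)
    (hmid : mid + 1 ≤ min r (alice.length : Int) - l) :
    ((pyParity (PySem.List.slice (PySem.List.slice alice (some l) (some r)) none (some (mid + 1))) ≠
      pyParity (PySem.List.slice (PySem.List.slice bob (some l) (some r)) none (some (mid + 1)))) ↔
     PySem.Int.mod (PySem.List.pyGetD (mkPS alice) (l + mid + 1) 0
        + PySem.List.pyGetD (mkPS alice) l 0
        + PySem.List.pyGetD (mkPS bob) (l + mid + 1) 0
        + PySem.List.pyGetD (mkPS bob) l 0) 2 = 1) := by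
  have hr0 : 0 ≤ r := by omega
  rw [PySem.List.slice_toNat alice h0 hr0, PySem.List.slice_toNat bob h0 hr0,
      PySem.List.slice_to _ (show (0 : Int) ≤ mid + 1 by omega),
      PySem.List.slice_to _ (show (0 : Int) ≤ mid + 1 by omega),
      List.take_take, List.take_take]
  have hmA : min (mid + 1).toNat (r.toNat - l.toNat) = (mid + 1).toNat := by omega
  rw [hmA]
  have hsA := seg_sum alice l.toNat (mid + 1).toNat (by omega)
  have hsB := seg_sum bob l.toNat (mid + 1).toNat (by omega)
  simp only [pyParity, pv_mod2, ne_eq]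
  rw [getPS alice (l + mid + 1) (by omega) (by omega), getPS alice l h0 (by omega),
      getPS bob (l + mid + 1) (by omega) (by omega), getPS bob l h0 (by omega)]
  have e1 : (l + mid + 1).toNat = l.toNat + (mid + 1).toNat := by omega
  rw [e1]
  have e2 : min (l.toNat + (mid + 1).toNat) alice.length = l.toNat + (mid + 1).toNat := by omega
  have e3 : min (l.toNat + (mid + 1).toNat) bob.length = l.toNat + (mid + 1).toNat := by omega
  rw [e2] at hsA; rw [e3] at hsB
  omega

-- length of slice xs[l:r] for 0 ≤ l ≤ len, 0 ≤ r
theorem pv_length_slice (xs : List Int) (l r : Int) (h0 : 0 ≤ l) (h1 : 0 ≤ r) (h2 : l ≤ xs.length) (h3 : l ≤ r) :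
    ((PySem.List.slice xs (some l) (some r)).length : Int)
      = min (min r (xs.length : Int)) (xs.length : Int) - min l (xs.length : Int) := by
  rw [PySem.List.slice_toNat xs h0 h1, List.length_take, List.length_drop]
  omega

theorem loop_eq_aux (alice bob : List Int) (hnm : alice.length ≤ bob.length) (l r : Int)
    (h0 : 0 ≤ l) (hlr : l < r) :
    ∀ (fuel : Nat) (s e : Int), (e - s).toNat ≤ fuel → 0 ≤ s →
      e < min r (alice.length : Int) - l →
      bsLoop (PySem.List.slice alice (some l) (some r)) (PySem.List.slice bob (some l) (some r)) s e
        = altSearchLoop (mkPS alice) (mkPS bob) l s e := by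
  intro fuel
  induction fuel with
  | zero =>
    intro s e hf hs he
    rw [bsLoop, altSearchLoop, dif_neg (by omega), dif_neg (by omega)]
  | succ fuel ih =>
    intro s e hf hs he
    rw [bsLoop, altSearchLoop]
    by_cases hse : s < e
    · rw [dif_pos hse, dif_pos hse]
      have hmb := pv_mid_bounds s e hse
      have hprobe := prefix_probe alice bob hnm l r (PySem.Int.floordiv (s + e) 2)
        h0 hlr (by omega) (by omega)
      by_cases hc : PySem.Int.mod (PySem.List.pyGetD (mkPS alice)
          (l + PySem.Int.floordiv (s + e) 2 + 1) 0
          + PySem.List.pyGetD (mkPS alice) l 0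
          + PySem.List.pyGetD (mkPS bob) (l + PySem.Int.floordiv (s + e) 2 + 1) 0
          + PySem.List.pyGetD (mkPS bob) l 0) 2 = 1
      · rw [if_pos (hprobe.mpr hc), if_pos hc]
        exact ih s (PySem.Int.floordiv (s + e) 2) (by omega) hs (by omega)
      · rw [if_neg (fun hne => hc (hprobe.mp hne)), if_neg hc]
        exact ih (PySem.Int.floordiv (s + e) 2 + 1) e (by omega) (by omega) he
    · rw [dif_neg hse, dif_neg hse]

theorem altSearchLoop_bounds (PA PB : List Int) (l : Int) :
    ∀ (fuel : Nat) (s e : Int), (e - s).toNat ≤ fuel →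
      s ≤ altSearchLoop PA PB l s e ∧ altSearchLoop PA PB l s e ≤ max s e := by
  intro fuel
  induction fuel with
  | zero =>
    intro s e hf
    rw [altSearchLoop, dif_neg (by omega)]
    omega
  | succ fuel ih =>
    intro s e hf
    rw [altSearchLoop]
    by_cases hse : s < e
    · rw [dif_pos hse]
      have hmb := pv_mid_bounds s e hse
      by_cases hc : PySem.Int.mod (PySem.List.pyGetD PA (l + PySem.Int.floordiv (s + e) 2 + 1) 0
          + PySem.List.pyGetD PA l 0
          + PySem.List.pyGetD PB (l + PySem.Int.floordiv (s + e) 2 + 1) 0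
          + PySem.List.pyGetD PB l 0) 2 = 1
      · rw [if_pos hc]
        have := ih s (PySem.Int.floordiv (s + e) 2) (by omega)
        omega
      · rw [if_neg hc]
        have := ih (PySem.Int.floordiv (s + e) 2 + 1) e (by omega)
        omega
    · rw [dif_neg hse]
      omega

-- the two searches agree on a block [l, r) (and their common value is in range)
theorem search_eq (alice bob : List Int) (hnm : alice.length ≤ bob.length) (l r : Int)
    (h0 : 0 ≤ l) (hln : l < alice.length) (hlr : l < r) :
    binary_search_error (PySem.List.slice alice (some l) (some r))
        (PySem.List.slice bob (some l) (some r))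
      = altSearch (mkPS alice) (mkPS bob) (alice.length) l r := by
  rw [binary_search_error, altSearch, PySem.List.len_eq,
      pv_length_slice alice l r h0 (by omega) (by omega) (by omega)]
  have hmm : min (min r (alice.length : Int)) (alice.length : Int) = min r (alice.length : Int) := by
    omega
  have hml : min l (alice.length : Int) = l := by omega
  rw [hmm, hml]
  exact loop_eq_aux alice bob hnm l r h0 hlr
    ((min r (alice.length : Int) - l - 1) - 0).toNat 0 (min r (alice.length : Int) - l - 1)
    (le_refl _) (le_refl _) (by omega)

theorem altSearch_bounds (PA PB : List Int) (n' l r : Int) (hl : l < min r n') :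
    l + altSearch PA PB n' l r < min r n' ∧ 0 ≤ altSearch PA PB n' l r := by
  have h := altSearchLoop_bounds PA PB l ((min r n' - l - 1) - 0).toNat 0 (min r n' - l - 1) (le_refl _)
  rw [altSearch]
  omega

theorem sum_set_lt (l : List Int) (i : Nat) (v : Int) (h : i < l.length) :
    (l.set i v).sum = l.sum - l[i] + v := by
  have h1 := List.sum_set l i v
  have h2 : (l.take i).sum + (l.drop i).sum = l.sum := List.sum_take_add_sum_drop l i
  have h3 : l.drop i = l[i] :: l.drop (i + 1) := List.drop_eq_getElem_cons h
  rw [if_pos h] at h1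
  rw [h3, List.sum_cons] at h2
  omega

theorem map_getD_self (l : List Int) :
    (List.range l.length).map (fun i => l.getD i 0) = l := by
  apply List.ext_getElem (by simp)
  intro j hj hj'
  simp only [List.getElem_map, List.getElem_range]
  exact List.getD_eq_getElem l 0 hj'

theorem flip_fold_spec : ∀ (cnt : Nat) (c : Int) (L : List Int), 0 ≤ c →
    c + cnt ≤ L.length →
    (PySem.List.pyRange c (c + cnt) 1).foldl
        (fun P k => PySem.List.pySetD P k (PySem.Int.mod (PySem.List.pyGetD P k 0 + 1) 2)) L
      = (List.range L.length).map
          (fun (i : Nat) => if c ≤ (i : Int) ∧ (i : Int) < c + cnt then (L.getD i 0 + 1) % 2 else L.getD i 0) := by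
  intro cnt
  induction cnt with
  | zero =>
    intro c L hc hcl
    simp only [Nat.cast_zero, add_zero]
    rw [PySem.List.pyRange_one_eq_nil (le_refl c)]
    simp only [List.foldl_nil]
    have hthis : ∀ i ∈ List.range L.length,
        (if c ≤ (i : Int) ∧ (i : Int) < c then (L.getD i 0 + 1) % 2 else L.getD i 0)
          = L.getD i 0 := by
      intro i _
      rw [if_neg (by omega)]
    rw [List.map_congr_left hthis, map_getD_self]
  | succ cnt ih =>
    intro c L hc hcl
    have hclen : c.toNat < L.length := by omega
    simp only [Nat.cast_add, Nat.cast_one]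
    rw [show c + ((cnt : Int) + 1) = (c + 1) + (cnt : Int) by ring]
    rw [PySem.List.pyRange_one_cons (by omega), List.foldl_cons]
    have hstep : PySem.List.pySetD L c (PySem.Int.mod (PySem.List.pyGetD L c 0 + 1) 2)
        = L.set c.toNat ((L.getD c.toNat 0 + 1) % 2) := by
      rw [PySem.List.pySetD_of_nonneg _ _ hc, pv_mod2,
          PySem.List.pyGetD_eq_getElem _ _ hc (by omega),
          List.getD_eq_getElem _ _ hclen]
    rw [hstep]
    have hlen1 : (L.set c.toNat ((L.getD c.toNat 0 + 1) % 2)).length = L.length := by simp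
    have hih := ih (c + 1) (L.set c.toNat ((L.getD c.toNat 0 + 1) % 2)) (by omega)
      (by rw [hlen1]; omega)
    rw [hih, hlen1]
    apply List.map_congr_left
    intro i hir
    have hiL : i < L.length := List.mem_range.mp hir
    by_cases hic : i = c.toNat
    · subst hic
      rw [if_neg (by omega), if_pos (by constructor <;> omega)]
      rw [List.getD_eq_getElem _ _ (by simpa using hiL), List.getElem_set_self (by omega),
          List.getD_eq_getElem _ _ hiL]
    · have hgd : (L.set c.toNat ((L.getD c.toNat 0 + 1) % 2)).getD i 0 = L.getD i 0 := by
        rw [List.getD_eq_getElem _ _ (by simpa using hiL), List.getElem_set_ne (by omega),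
            List.getD_eq_getElem _ _ hiL]
      rw [hgd]
      have hicI : (i : Int) ≠ c := by omega
      by_cases hcond : c ≤ (i : Int) ∧ (i : Int) < c + 1 + (cnt : Int)
      · rw [if_pos (by omega), if_pos hcond]
      · rw [if_neg (by omega), if_neg hcond]

-- flipping PB[j+1:len+1] turns mkPS xs into mkPS (xs.set j v) when the parity at j changes
theorem mkPS_set_flip (xs : List Int) (j v : Int) (h0 : 0 ≤ j) (hj : j.toNat < xs.length)
    (hodd : (v - xs[j.toNat]) % 2 ≠ 0) :
    (PySem.List.pyRange (j + 1) ((xs.length : Int) + 1) 1).foldl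
        (fun P k => PySem.List.pySetD P k (PySem.Int.mod (PySem.List.pyGetD P k 0 + 1) 2)) (mkPS xs)
      = mkPS (xs.set j.toNat v) := by
  have hrange : (xs.length : Int) + 1 = (j + 1) + ((xs.length - j.toNat : Nat) : Int) := by
    push_cast; omega
  rw [hrange, flip_fold_spec _ _ _ (by omega) (by rw [length_mkPS]; push_cast; omega)]
  rw [length_mkPS]
  have hlen : (xs.set j.toNat v).length = xs.length := by simp
  conv_rhs => rw [mkPS]
  rw [hlen]
  apply List.map_congr_left
  intro k hkr
  have hk : k ≤ xs.length := by have := List.mem_range.mp hkr; omega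
  rw [getD_mkPS xs k hk]
  by_cases hkj : (k : Int) ≤ j
  · rw [if_neg (by omega), List.take_set_of_le (by omega)]
  · rw [if_pos (by constructor <;> push_cast <;> omega), List.take_set,
        sum_set_lt _ _ _ (by rw [List.length_take]; omega), List.getElem_take]
    omega

-- setting xs[j] := v with unchanged parity leaves the prefix-parity array unchanged
theorem mkPS_set_even (xs : List Int) (j : Nat) (v : Int) (hj : j < xs.length)
    (heven : (v - xs[j]) % 2 = 0) : mkPS (xs.set j v) = mkPS xs := by
  unfold mkPS
  rw [List.length_set]
  apply List.map_congr_left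
  intro k _
  by_cases hkj : k ≤ j
  · rw [List.take_set_of_le (by omega)]
  · rw [List.take_set, sum_set_lt _ _ _ (by rw [List.length_take]; omega), List.getElem_take]
    omega

-- altFix restores the invariant PB = mkPS bob
theorem fix_eq (alice bob : List Int) (hnm : alice.length ≤ bob.length) (j : Int)
    (h0 : 0 ≤ j) (hj : j < alice.length) :
    altFix alice (bob.length : Int) (bob, mkPS bob) j
      = (PySem.List.pySetD bob j (PySem.List.pyGetD alice j 0),
         mkPS (PySem.List.pySetD bob j (PySem.List.pyGetD alice j 0))) := by
  have hjb : j.toNat < bob.length := by omega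
  have hga : PySem.List.pyGetD alice j 0 = alice[j.toNat]'(by omega) :=
    PySem.List.pyGetD_eq_getElem _ _ h0 (by omega)
  have hgb : PySem.List.pyGetD bob j 0 = bob[j.toNat] :=
    PySem.List.pyGetD_eq_getElem _ _ h0 (by omega)
  have hset : PySem.List.pySetD bob j (PySem.List.pyGetD alice j 0)
      = bob.set j.toNat (alice[j.toNat]'(by omega)) := by
    rw [PySem.List.pySetD_of_nonneg _ _ h0, hga]
  have hset2 : PySem.List.pySetD bob j (alice[j.toNat]'(by omega))
      = bob.set j.toNat (alice[j.toNat]'(by omega)) :=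
    PySem.List.pySetD_of_nonneg _ _ h0
  simp only [altFix, hga, hgb]
  by_cases hc : PySem.Int.mod (alice[j.toNat]'(by omega) - bob[j.toNat]) 2 ≠ 0
  · rw [if_pos hc, hset2]
    have hodd : ((alice[j.toNat]'(by omega)) - bob[j.toNat]) % 2 ≠ 0 := by
      rw [pv_mod2] at hc; exact hc
    rw [mkPS_set_flip bob j (alice[j.toNat]'(by omega)) h0 hjb hodd]
  · rw [if_neg hc, hset2]
    have heven : ((alice[j.toNat]'(by omega)) - bob[j.toNat]) % 2 = 0 := by
      rw [pv_mod2] at hc; omega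
    rw [mkPS_set_even bob j.toNat (alice[j.toNat]'(by omega)) hjb heven]

theorem pyRange_nil_neg (a b s : Int) (hs : s < 0) (hab : a ≤ b) :
    PySem.List.pyRange a b s = [] := by
  unfold PySem.List.pyRange
  simp [show ¬ (0:Int) < s by omega, show ¬ b < a by omega]

theorem cond_iff (alice bob0 bobA : List Int) (hnm : alice.length ≤ bob0.length)
    (hlen : bobA.length = bob0.length)
    (l r : Int) (h0 : 0 ≤ l) (hln : l < alice.length) (hlr : l < r) :
    (altMismatch (mkPS alice) (mkPS bobA) (alice.length : Int) (bob0.length : Int) l r = true)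
      ↔ (pyParity (PySem.List.slice alice (some l) (some r)) ≠
         pyParity (PySem.List.slice bobA (some l) (some r))) := by
  rw [show ((bob0.length : Int)) = (bobA.length : Int) by rw [hlen]]
  exact (mismatch_iff alice bobA (by omega) l r h0 hln hlr).symm

theorem fix_state (alice bob0 bobA : List Int) (hnm : alice.length ≤ bob0.length)
    (hlen : bobA.length = bob0.length)
    (j : Int) (h0 : 0 ≤ j) (hj : j < alice.length) :
    altFix alice (bob0.length : Int) (bobA, mkPS bobA) j
      = (PySem.List.pySetD bobA j (PySem.List.pyGetD alice j 0),
         mkPS (PySem.List.pySetD bobA j (PySem.List.pyGetD alice j 0)))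
    ∧ (PySem.List.pySetD bobA j (PySem.List.pyGetD alice j 0)).length = bob0.length := by
  constructor
  · rw [show ((bob0.length : Int)) = (bobA.length : Int) by rw [hlen]]
    exact fix_eq alice bobA (by omega) j h0 hj
  · rw [PySem.List.pySetD_of_nonneg _ _ h0]
    simp [hlen]

theorem casc_eq (alice bob0 : List Int) (hnm : alice.length ≤ bob0.length) (j minb : Int)
    (hj0 : 0 ≤ j) (hjn : j < alice.length) :
    ∀ (fuel : Nat) (b2 : Int), b2.toNat ≤ fuel → ∀ bobA, bobA.length = bob0.length →
      altCascLoop alice (mkPS alice) (alice.length : Int) (bob0.length : Int)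
          (bobA, mkPS bobA) j minb b2
        = (cascLoop alice bobA j minb b2, mkPS (cascLoop alice bobA j minb b2))
      ∧ (cascLoop alice bobA j minb b2).length = bob0.length := by
  intro fuel
  induction fuel with
  | zero =>
    intro b2 hf bobA hlen
    rw [cascLoop, altCascLoop, dif_neg (by omega), dif_neg (by omega)]
    exact ⟨rfl, hlen⟩
  | succ fuel ih =>
    intro b2 hf bobA hlen
    rw [cascLoop, altCascLoop]
    by_cases hb : minb ≤ b2 ∧ 1 ≤ b2
    · rw [dif_pos hb, dif_pos hb]
      dsimp only
      have hdm := PySem.Int.floordiv_mul_add_mod j b2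
      have hm0 := PySem.Int.mod_nonneg j (b := b2) (by omega)
      have hmlt := PySem.Int.mod_lt j (b := b2) (by omega)
      have hfd0 : 0 ≤ PySem.Int.floordiv j b2 := by
        rw [PySem.Int.floordiv_eq_ediv_of_pos (by omega)]
        exact Int.ediv_nonneg hj0 (by omega)
      set l := PySem.Int.floordiv j b2 * b2 with hldef
      have hl0 : 0 ≤ l := mul_nonneg hfd0 (by omega)
      have hln : l < alice.length := by omega
      have hlr : l < l + b2 := by omega
      have hcond := cond_iff alice bob0 bobA hnm hlen l (l + b2) hl0 hln hlr
      by_cases hc : pyParity (PySem.List.slice alice (some l) (some (l + b2))) ≠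
          pyParity (PySem.List.slice bobA (some l) (some (l + b2)))
      · rw [if_pos (hcond.mpr hc), if_pos hc]
        rw [search_eq alice bobA (by omega) l (l + b2) hl0 hln hlr]
        have hsb := altSearch_bounds (mkPS alice) (mkPS bobA) (alice.length : Int) l (l + b2)
          (by omega)
        set ne := altSearch (mkPS alice) (mkPS bobA) (alice.length : Int) l (l + b2) with hnedef
        have hfix := fix_state alice bob0 bobA hnm hlen (l + ne) (by omega) (by omega)
        rw [hfix.1]
        exact ih (PySem.Int.floordiv b2 2) (by have := pv_half_lt b2 hb.2; omega)
          _ hfix.2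
      · rw [if_neg (fun hcc => hc (hcond.mp hcc)), if_neg hc]
        exact ih (PySem.Int.floordiv b2 2) (by have := pv_half_lt b2 hb.2; omega)
          bobA hlen
    · rw [dif_neg hb, dif_neg hb]
      exact ⟨rfl, hlen⟩

theorem build_aux : ∀ (xs : List Int) (L : List Int) (p : Int),
    (xs.foldl (fun Pp v => (Pp.1 ++ [PySem.Int.mod (Pp.2 + v) 2], PySem.Int.mod (Pp.2 + v) 2))
        (L, p)).1
      = L ++ (List.range xs.length).map (fun (k : Nat) => (p + (xs.take (k + 1)).sum) % 2) := by
  intro xs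
  induction xs with
  | nil => intro L p; simp
  | cons v t ih =>
    intro L p
    simp only [List.foldl_cons]
    rw [ih, pv_mod2]
    rw [List.length_cons, List.range_succ_eq_map]
    simp only [List.map_cons, List.map_map]
    rw [List.append_assoc, List.singleton_append]
    congr 1
    congr 1
    · simp
    · apply List.map_congr_left
      intro k _
      simp only [Function.comp_apply, Nat.succ_eq_add_one, List.take_succ_cons, List.sum_cons]
      omega

theorem buildPS_eq (xs : List Int) :
    (xs.foldl (fun Pp v => (Pp.1 ++ [PySem.Int.mod (Pp.2 + v) 2], PySem.Int.mod (Pp.2 + v) 2))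
        ([(0 : Int)], (0 : Int))).1 = mkPS xs := by
  rw [build_aux, mkPS, List.range_succ_eq_map]
  simp only [List.map_cons, List.map_map, List.singleton_append]
  congr 1
  apply List.map_congr_left
  intro k _
  simp only [Function.comp_apply, Nat.succ_eq_add_one]
  omega

theorem inner_eq (alice bob0 : List Int) (hnm : alice.length ≤ bob0.length)
    (bs ibs rr : Int) (hbs : 1 ≤ bs) :
    ∀ (is : List Int), (∀ x ∈ is, 0 ≤ x ∧ x < (alice.length : Int)) →
    ∀ bobA, bobA.length = bob0.length →
      (is.foldl (fun st i =>
          if altMismatch (mkPS alice) st.2 (alice.length : Int) (bob0.length : Int) i (i + bs) then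
            let j := i + altSearch (mkPS alice) st.2 (alice.length : Int) i (i + bs)
            let st' := altFix alice (bob0.length : Int) st j
            if rr > 0 then
              altCascLoop alice (mkPS alice) (alice.length : Int)
                (bob0.length : Int) st' j ibs (PySem.Int.floordiv (alice.length : Int) 2)
            else st'
          else st) (bobA, mkPS bobA))
        = ((is.foldl (fun bob i =>
            let alice_block := PySem.List.slice alice (some i) (some (i + bs))
            let bob_block := PySem.List.slice bob (some i) (some (i + bs))
            if pyParity alice_block ≠ pyParity bob_block then
              let ei := binary_search_error alice_block bob_block
              let bob' := PySem.List.pySetD bob (i + ei) (PySem.List.pyGetD alice (i + ei) 0)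
              if rr > 0 then cascade_to_previous_blocks alice bob' (i + ei) ibs else bob'
            else bob) bobA),
           mkPS (is.foldl (fun bob i =>
            let alice_block := PySem.List.slice alice (some i) (some (i + bs))
            let bob_block := PySem.List.slice bob (some i) (some (i + bs))
            if pyParity alice_block ≠ pyParity bob_block then
              let ei := binary_search_error alice_block bob_block
              let bob' := PySem.List.pySetD bob (i + ei) (PySem.List.pyGetD alice (i + ei) 0)
              if rr > 0 then cascade_to_previous_blocks alice bob' (i + ei) ibs else bob'
            else bob) bobA))
      ∧ (is.foldl (fun bob i =>
            let alice_block := PySem.List.slice alice (some i) (some (i + bs))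
            let bob_block := PySem.List.slice bob (some i) (some (i + bs))
            if pyParity alice_block ≠ pyParity bob_block then
              let ei := binary_search_error alice_block bob_block
              let bob' := PySem.List.pySetD bob (i + ei) (PySem.List.pyGetD alice (i + ei) 0)
              if rr > 0 then cascade_to_previous_blocks alice bob' (i + ei) ibs else bob'
            else bob) bobA).length = bob0.length := by
  intro is
  induction is with
  | nil =>
    intro _ bobA hlen
    exact ⟨rfl, hlen⟩
  | cons i t ih =>
    intro hmem bobA hlen
    obtain ⟨hi0, hin⟩ := hmem i (List.mem_cons_self)
    have hmem' : ∀ x ∈ t, 0 ≤ x ∧ x < (alice.length : Int) := fun x hx =>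
      hmem x (List.mem_cons_of_mem _ hx)
    simp only [List.foldl_cons]
    have hlr : i < i + bs := by omega
    have hcond := cond_iff alice bob0 bobA hnm hlen i (i + bs) hi0 hin hlr
    by_cases hc : pyParity (PySem.List.slice alice (some i) (some (i + bs))) ≠
        pyParity (PySem.List.slice bobA (some i) (some (i + bs)))
    · rw [if_pos (hcond.mpr hc), if_pos hc]
      rw [search_eq alice bobA (by omega) i (i + bs) hi0 hin hlr]
      have hsb := altSearch_bounds (mkPS alice) (mkPS bobA) (alice.length : Int) i (i + bs)
        (by omega)
      set ne := altSearch (mkPS alice) (mkPS bobA) (alice.length : Int) i (i + bs) with hnedef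
      have hfix := fix_state alice bob0 bobA hnm hlen (i + ne) (by omega) (by omega)
      simp only [hfix.1]
      set bobA' := PySem.List.pySetD bobA (i + ne) (PySem.List.pyGetD alice (i + ne) 0)
        with hbdef
      by_cases hrr : rr > 0
      · rw [if_pos hrr, if_pos hrr]
        rw [cascade_to_previous_blocks, PySem.List.len_eq]
        have hcasc := casc_eq alice bob0 hnm (i + ne) ibs (by omega) (by omega)
          (PySem.Int.floordiv (alice.length : Int) 2).toNat
          (PySem.Int.floordiv (alice.length : Int) 2) (le_refl _)
          bobA' hfix.2
        rw [hcasc.1]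
        exact ih hmem' _ hcasc.2
      · rw [if_neg hrr, if_neg hrr]
        exact ih hmem' _ hfix.2
    · rw [if_neg (fun hcc => hc (hcond.mp hcc)), if_neg hc]
      exact ih hmem' bobA hlen

theorem outer_eq (alice bob0 : List Int) (hnm : alice.length ≤ bob0.length)
    (ibs : Int) (hibs : 1 ≤ ibs) :
    ∀ (rs : List Int) (bobA : List Int), bobA.length = bob0.length →
      (rs.foldl (fun st r =>
          (PySem.List.pyRange 0 (alice.length : Int) (ibs * 2 ^ r.toNat)).foldl (fun st i =>
            if altMismatch (mkPS alice) st.2 (alice.length : Int) (bob0.length : Int)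
                i (i + ibs * 2 ^ r.toNat) then
              let j := i + altSearch (mkPS alice) st.2 (alice.length : Int) i (i + ibs * 2 ^ r.toNat)
              let st' := altFix alice (bob0.length : Int) st j
              if r > 0 then
                altCascLoop alice (mkPS alice) (alice.length : Int)
                  (bob0.length : Int) st' j ibs (PySem.Int.floordiv (alice.length : Int) 2)
              else st'
            else st) st) (bobA, mkPS bobA))
        = ((rs.foldl (fun bob r =>
              (PySem.List.pyRange 0 (alice.length : Int) (ibs * 2 ^ r.toNat)).foldl (fun bob i =>
                let alice_block := PySem.List.slice alice (some i) (some (i + ibs * 2 ^ r.toNat))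
                let bob_block := PySem.List.slice bob (some i) (some (i + ibs * 2 ^ r.toNat))
                if pyParity alice_block ≠ pyParity bob_block then
                  let ei := binary_search_error alice_block bob_block
                  let bob' := PySem.List.pySetD bob (i + ei) (PySem.List.pyGetD alice (i + ei) 0)
                  if r > 0 then cascade_to_previous_blocks alice bob' (i + ei) ibs else bob'
                else bob) bob) bobA),
           mkPS (rs.foldl (fun bob r =>
              (PySem.List.pyRange 0 (alice.length : Int) (ibs * 2 ^ r.toNat)).foldl (fun bob i =>
                let alice_block := PySem.List.slice alice (some i) (some (i + ibs * 2 ^ r.toNat))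
                let bob_block := PySem.List.slice bob (some i) (some (i + ibs * 2 ^ r.toNat))
                if pyParity alice_block ≠ pyParity bob_block then
                  let ei := binary_search_error alice_block bob_block
                  let bob' := PySem.List.pySetD bob (i + ei) (PySem.List.pyGetD alice (i + ei) 0)
                  if r > 0 then cascade_to_previous_blocks alice bob' (i + ei) ibs else bob'
                else bob) bob) bobA))
      ∧ (rs.foldl (fun bob r =>
              (PySem.List.pyRange 0 (alice.length : Int) (ibs * 2 ^ r.toNat)).foldl (fun bob i =>
                let alice_block := PySem.List.slice alice (some i) (some (i + ibs * 2 ^ r.toNat))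
                let bob_block := PySem.List.slice bob (some i) (some (i + ibs * 2 ^ r.toNat))
                if pyParity alice_block ≠ pyParity bob_block then
                  let ei := binary_search_error alice_block bob_block
                  let bob' := PySem.List.pySetD bob (i + ei) (PySem.List.pyGetD alice (i + ei) 0)
                  if r > 0 then cascade_to_previous_blocks alice bob' (i + ei) ibs else bob'
                else bob) bob) bobA).length = bob0.length := by
  intro rs
  induction rs with
  | nil =>
    intro bobA hlen
    exact ⟨rfl, hlen⟩
  | cons r rt ih =>
    intro bobA hlen
    simp only [List.foldl_cons]
    have hbs : (1 : Int) ≤ ibs * 2 ^ r.toNat := by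
      have h2 : (0 : Int) < 2 ^ r.toNat := pow_pos (by norm_num) _
      nlinarith
    have hmem : ∀ x ∈ PySem.List.pyRange 0 (alice.length : Int) (ibs * 2 ^ r.toNat),
        0 ≤ x ∧ x < (alice.length : Int) := by
      intro x hx
      have hpos : (0 : Int) < ibs * 2 ^ r.toNat := by omega
      have := (PySem.List.mem_pyRange_iff_of_pos hpos x).mp hx
      omega
    have hstep := inner_eq alice bob0 hnm (ibs * 2 ^ r.toNat) ibs r hbs
      (PySem.List.pyRange 0 (alice.length : Int) (ibs * 2 ^ r.toNat)) hmem bobA hlen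
    rw [hstep.1]
    exact ih _ hstep.2

-- ===== VERDICT (by name: the statement is the Claim_ definition above) =====
theorem cascade_error_correction_spec : Claim_equal_cascade_error_correction := by
  unfold Claim_equal_cascade_error_correction
  intro alice bob ibs rounds hDom hPre
  unfold Spec_cascade_error_correction
  obtain ⟨hPre2, hPre3⟩ := hPre
  unfold cascade_error_correction cascade_error_correction_alt
  simp only [PySem.List.len_eq]
  rw [buildPS_eq, buildPS_eq]
  by_cases hro : rounds ≤ 0
  · rw [PySem.List.pyRange_one_eq_nil hro]
    simp
  · have hibsne : ibs ≠ 0 := by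
      rcases hPre2 with h | h
      · exact absurd h hro
      · exact h
    by_cases hibs : 1 ≤ ibs
    · have hnm : alice.length ≤ bob.length := by
        rcases hPre3 with h | h | h
        · exact absurd h hro
        · omega
        · exact h
      have houter := outer_eq alice bob hnm ibs hibs
        (PySem.List.pyRange 0 rounds 1) bob rfl
      rw [houter.1]
    · have hneg : ibs < 0 := by omega
      have hnil : ∀ (r : Int),
          (PySem.List.pyRange 0 (alice.length : Int) (ibs * 2 ^ r.toNat)) = [] := by
        intro r
        exact pyRange_nil_neg _ _ _
          (mul_neg_of_neg_of_pos hneg (pow_pos (by norm_num) _)) (by positivity)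
      simp only [hnil, List.foldl_nil, PySem.List.foldl_ignore]
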